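-- pv_equiv track=rewrite | github.com/Julesc013/dominium | src/core/flow/flow_engine.py | _subtract_component_maps
-- ===== SOURCE A (Python) =====
-- from typing import Dict, List, Mapping
--
-- def _as_int(value: object, default_value: int = 0) -> int:
--     try:
--         return int(value)
--     except (TypeError, ValueError):
--         return int(default_value)
--
-- def _normalize_component_map(value: object) -> Dict[str, int]:
--     if not isinstance(value, Mapping):
--         return {}
--     out: Dict[str, int] = {}
--     for key in sorted(value.keys(), key=lambda item: str(item)):
--         token = str(key).strip()
--         if not token:
--             continue
--         out[token] = int(max(0, _as_int(value.get(key, 0), 0)))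
--     return out
--
-- def _subtract_component_maps(base: Mapping[str, object] | None, delta: Mapping[str, object] | None) -> Dict[str, int]:
--     base_map = _normalize_component_map(base)
--     delta_map = _normalize_component_map(delta)
--     out: Dict[str, int] = {}
--     for key in sorted(set(list(base_map.keys()) + list(delta_map.keys()))):
--         value = int(max(0, int(base_map.get(key, 0)) - int(delta_map.get(key, 0))))
--         if value > 0:
--             out[key] = value
--     return out
-- ===== SOURCE B (Python) =====
-- from typing import Dict, Mapping
--
-- def _as_int(value: object, default_value: int = 0) -> int:
--     try:
--         return int(value)
--     except (TypeError, ValueError):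
--         return int(default_value)
--
-- def _normalize_component_map(value: object) -> Dict[str, int]:
--     if not isinstance(value, Mapping):
--         return {}
--     out: Dict[str, int] = {}
--     for key in sorted(value.keys(), key=lambda item: str(item)):
--         token = str(key).strip()
--         if not token:
--             continue
--         out[token] = int(max(0, _as_int(value.get(key, 0), 0)))
--     return out
--
-- def _merge_sub(bs, ds):
--     # Merge-join of two key-sorted item lists.  Keys appearing only in the
--     # delta can never yield a positive remainder (normalized values are
--     # clamped to >= 0), so they are simply skipped.
--     out = []
--     i = j = 0
--     while i < len(bs) and j < len(ds):
--         bk, bv = bs[i]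
--         dk, dv = ds[j]
--         if bk < dk:
--             if bv > 0:
--                 out.append((bk, bv))
--             i += 1
--         elif dk < bk:
--             j += 1
--         else:
--             if bv - dv > 0:
--                 out.append((bk, bv - dv))
--             i += 1
--             j += 1
--     for k, v in bs[i:]:
--         if v > 0:
--             out.append((k, v))
--     return dict(out)
--
-- def _subtract_component_maps(base, delta):
--     bs = sorted(_normalize_component_map(base).items(), key=lambda p: p[0])
--     ds = sorted(_normalize_component_map(delta).items(), key=lambda p: p[0])
--     return _merge_sub(bs, ds)
-- ===== Notes on version B (the rewrite author's own statement) =====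
-- stated objective: alternative
-- what changed: A builds the sorted union of the two key sets and then looks each key up in both dicts with a clamp and a positivity filter; B instead sorts the two normalized item lists by key and runs a two-pointer merge-join over them, emitting positive base-minus-delta remainders directly and skipping delta-only keys (which can never be positive after clamping), with no per-key dict lookups and no union set.
import Mathlib
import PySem

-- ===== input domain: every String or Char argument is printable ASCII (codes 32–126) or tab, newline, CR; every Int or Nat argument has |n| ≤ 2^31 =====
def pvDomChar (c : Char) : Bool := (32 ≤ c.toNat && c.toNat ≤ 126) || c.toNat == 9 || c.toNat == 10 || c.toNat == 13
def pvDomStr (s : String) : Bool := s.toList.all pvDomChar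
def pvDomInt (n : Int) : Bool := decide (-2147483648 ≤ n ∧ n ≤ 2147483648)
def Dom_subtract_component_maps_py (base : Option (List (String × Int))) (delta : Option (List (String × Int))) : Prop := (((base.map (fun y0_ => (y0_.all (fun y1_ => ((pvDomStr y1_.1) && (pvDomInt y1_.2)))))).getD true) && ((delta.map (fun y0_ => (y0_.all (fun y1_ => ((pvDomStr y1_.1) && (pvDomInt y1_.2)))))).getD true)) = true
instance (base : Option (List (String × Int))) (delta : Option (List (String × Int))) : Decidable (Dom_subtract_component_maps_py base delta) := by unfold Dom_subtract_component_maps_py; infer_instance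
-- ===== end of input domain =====

-- B replaces A's sorted-union-of-keys loop with its per-key dict lookups, clamp and positivity
-- filter by a two-pointer merge-join over the two key-sorted normalized item lists; alternative, same cost.


-- ===== PORT A =====
-- _normalize_component_map (shared verbatim by Source A and Source B): on our typed inputs a
-- None argument is not a Mapping (→ {}), keys are str (str(key) = key), values are int
-- (_as_int(v, 0) = v), so out[token] = max(0, v).
def normalizeComponentMap (value : Option (List (String × Int))) : PySem.Dict String Int :=
  match value with
  | none => PySem.Dict.empty
  | some pairs =>
    let d := PySem.Dict.ofList pairs
    (PySem.List.sorted d.keys (fun k => k) false).foldl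
      (fun out key =>
        let token := PySem.Str.strip key
        if token = "" then out
        else out.insert token (max 0 (d.getD key 0)))
      PySem.Dict.empty

def subtract_component_maps_py (base : Option (List (String × Int))) (delta : Option (List (String × Int))) : List (String × Int) :=
  let base_map := normalizeComponentMap base
  let delta_map := normalizeComponentMap delta
  let out := (PySem.List.sorted (PySem.Set.ofList (base_map.keys ++ delta_map.keys)) (fun k => k) false).foldl
    (fun out key =>
      let value := max 0 (base_map.getD key 0 - delta_map.getD key 0)
      if 0 < value then out.insert key value else out)
    PySem.Dict.empty
  out.items

-- ===== PORT B =====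
-- _merge_sub's two-pointer while loop, as structural recursion on the two sorted item
-- lists; the trailing 'for k, v in bs[i:]' loop is the (bs, []) arm.
def mergeSub : List (String × Int) → List (String × Int) → List (String × Int)
  | bs, [] => bs.filter (fun p => decide (0 < p.2))
  | [], _ :: _ => []
  | (bk, bv) :: bt, (dk, dv) :: dt =>
    if bk < dk then
      (if 0 < bv then [(bk, bv)] else []) ++ mergeSub bt ((dk, dv) :: dt)
    else if dk < bk then
      mergeSub ((bk, bv) :: bt) dt
    else
      (if 0 < bv - dv then [(bk, bv - dv)] else []) ++ mergeSub bt dt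
termination_by bs ds => bs.length + ds.length

def subtract_component_maps_py_alt (base : Option (List (String × Int))) (delta : Option (List (String × Int))) : List (String × Int) :=
  let bs := PySem.List.sorted (normalizeComponentMap base).items (fun p => p.1) false
  let ds := PySem.List.sorted (normalizeComponentMap delta).items (fun p => p.1) false
  (PySem.Dict.ofList (mergeSub bs ds)).items

-- ===== PRECONDITION & SPEC =====
def Spec_subtract_component_maps_py (base : Option (List (String × Int))) (delta : Option (List (String × Int))) (out : List (String × Int)) : Prop := out = subtract_component_maps_py_alt base delta
instance (base : Option (List (String × Int))) (delta : Option (List (String × Int))) (out : List (String × Int)) : Decidable (Spec_subtract_component_maps_py base delta out) := by unfold Spec_subtract_component_maps_py; infer_instance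

-- ===== CLAIM (what is proved, stated in full; the proofs are below) =====
def Claim_equal_subtract_component_maps_py : Prop := ∀ (base : Option (List (String × Int))) (delta : Option (List (String × Int))), Dom_subtract_component_maps_py base delta → Spec_subtract_component_maps_py base delta (subtract_component_maps_py base delta)

-- ===== LEMMAS AND PROOFS =====

-- the normalize fold keeps keys unique
lemma nodup_keys_normFold (g : String → Int) (l : List String) (d : PySem.Dict String Int)
    (h : d.keys.Nodup) :
    (l.foldl (fun out key =>
        if PySem.Str.strip key = "" then out
        else out.insert (PySem.Str.strip key) (max 0 (g key))) d).keys.Nodup := by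
  induction l generalizing d with
  | nil => exact h
  | cons k t ih =>
    simp only [List.foldl_cons]
    by_cases hk : PySem.Str.strip k = ""
    · simp only [if_pos hk]
      exact ih d h
    · simp only [if_neg hk]
      exact ih _ (PySem.Dict.nodup_keys_insert _ _ _ h)

-- the normalize fold keeps every defaulted lookup non-negative
lemma nonneg_normFold (g : String → Int) (l : List String) (d : PySem.Dict String Int)
    (h : ∀ k, 0 ≤ d.getD k 0) :
    ∀ k, 0 ≤ (l.foldl (fun out key =>
        if PySem.Str.strip key = "" then out
        else out.insert (PySem.Str.strip key) (max 0 (g key))) d).getD k 0 := by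
  induction l generalizing d with
  | nil => exact h
  | cons k t ih =>
    intro x
    simp only [List.foldl_cons]
    by_cases hk : PySem.Str.strip k = ""
    · simp only [if_pos hk]
      exact ih d h x
    · simp only [if_neg hk]
      refine ih _ ?_ x
      intro y
      rw [PySem.Dict.getD_insert]
      split
      · exact le_max_left _ _
      · exact h y

lemma nodup_keys_norm (v : Option (List (String × Int))) :
    (normalizeComponentMap v).keys.Nodup := by
  cases v with
  | none => simp [normalizeComponentMap, PySem.Dict.keys_empty]
  | some pairs =>
    exact nodup_keys_normFold _ _ _ (by simp [PySem.Dict.keys_empty])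

lemma nonneg_norm (v : Option (List (String × Int))) (k : String) :
    0 ≤ (normalizeComponentMap v).getD k 0 := by
  cases v with
  | none => simp [normalizeComponentMap]
  | some pairs =>
    exact nonneg_normFold _ _ _ (fun k => by simp [PySem.Dict.getD_empty]) k

-- a conditional-insert loop over fresh distinct keys appends the filtered items
lemma items_foldl_cond_insert (F : String → Int) (l : List String)
    (d : PySem.Dict String Int) (hnd : l.Nodup) (hd : ∀ k ∈ l, d.contains k = false) :
    (l.foldl (fun out k => if 0 < F k then out.insert k (F k) else out) d).items
      = d.items ++ (l.filter (fun k => decide (0 < F k))).map (fun k => (k, F k)) := by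
  induction l generalizing d with
  | nil => simp
  | cons k t ih =>
    have hkn : d.contains k = false := hd k (by simp)
    have htc : ∀ x ∈ t, d.contains x = false := fun x hx => hd x (by simp [hx])
    simp only [List.foldl_cons]
    by_cases hF : 0 < F k
    · have htc' : ∀ x ∈ t, (d.insert k (F k)).contains x = false := by
        intro x hx
        rw [PySem.Dict.contains_insert]
        have : x ≠ k := fun e => (List.nodup_cons.1 hnd).1 (e ▸ hx)
        simp [this, htc x hx]
      rw [if_pos hF, ih _ (List.nodup_cons.1 hnd).2 htc',
        PySem.Dict.items_insert_of_not_contains _ _ hkn]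
      simp [hF]
    · rw [if_neg hF, ih _ (List.nodup_cons.1 hnd).2 htc]
      simp [hF]

-- the positive part of the sorted union of keys is the sorted positive part of `bk`
lemma sorted_union_filter_eq (bk dk : List String) (hb : bk.Nodup) (F : String → Int)
    (hF : ∀ k, k ∉ bk → F k ≤ 0) :
    (PySem.List.sorted (PySem.Set.ofList (bk ++ dk)) (fun k => k) false).filter
        (fun k => decide (0 < F k))
      = PySem.List.sorted (bk.filter (fun k => decide (0 < F k))) (fun k => k) false := by
  have hpw : (PySem.List.sorted (PySem.Set.ofList (bk ++ dk)) (fun k => k) false).Pairwise (· < ·) :=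
    PySem.List.sorted_ofList_pairwise_lt _
  refine (PySem.List.sorted_eq_of_perm_of_pairwise_lt (κ := String)
      (bk.filter (fun k => decide (0 < F k)))
      ((PySem.List.sorted (PySem.Set.ofList (bk ++ dk)) (fun k => k) false).filter
        (fun k => decide (0 < F k))) (fun k => k) ?_ ?_).symm
  · have h1 : ((PySem.List.sorted (PySem.Set.ofList (bk ++ dk)) (fun k => k) false).filter
        (fun k => decide (0 < F k))).Nodup :=
      List.Nodup.filter _ ((hpw.imp (fun h => ne_of_lt h)))
    rw [List.perm_ext_iff_of_nodup h1 (hb.filter _)]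
    intro x
    simp only [List.mem_filter, PySem.List.mem_sorted, PySem.Set.mem_ofList, List.mem_append,
      decide_eq_true_eq]
    constructor
    · rintro ⟨hm, hx⟩
      refine ⟨?_, hx⟩
      rcases hm with h | h
      · exact h
      · by_contra hnb
        exact absurd hx (by have := hF x hnb; omega)
    · rintro ⟨hm, hx⟩
      exact ⟨Or.inl hm, hx⟩
  · exact hpw.filter _

-- sorting a Nodup list of keys gives a strictly increasing list
lemma sorted_keys_pairwise_lt (l : List String) (hnd : l.Nodup) :
    (PySem.List.sorted l (fun k => k) false).Pairwise (· < ·) := by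
  have h1 := PySem.List.sorted_pairwise l (fun k => k)
  have h2 : (PySem.List.sorted l (fun k => k) false).Nodup :=
    (PySem.List.sorted_perm l (fun k => k) false).nodup_iff.2 hnd
  exact (h1.and h2).imp (fun h => lt_of_le_of_ne h.1 h.2)

-- sorting a Nodup-keyed dict's items by key maps the sorted key list through getD
lemma sorted_items_eq (d : PySem.Dict String Int) (hnd : d.keys.Nodup) :
    PySem.List.sorted d.items (fun p => p.1) false
      = (PySem.List.sorted d.keys (fun k => k) false).map (fun k => (k, d.getD k 0)) := by
  apply PySem.List.sorted_eq_of_perm_of_pairwise_lt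
  · rw [PySem.Dict.items_eq_map_keys d hnd 0]
    exact (PySem.List.sorted_perm d.keys (fun k => k) false).map _
  · exact List.Pairwise.map _ (fun a b h => h) (sorted_keys_pairwise_lt d.keys hnd)

-- filtering commutes with sorting distinct keys
lemma filter_sorted_keys (l : List String) (hnd : l.Nodup) (q : String → Bool) :
    (PySem.List.sorted l (fun k => k) false).filter q
      = PySem.List.sorted (l.filter q) (fun k => k) false := by
  refine (PySem.List.sorted_eq_of_perm_of_pairwise_lt _ _ _ ?_ ?_).symm
  · exact (PySem.List.sorted_perm l (fun k => k) false).filter q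
  · exact (sorted_keys_pairwise_lt l hnd).filter q

-- dict() of a list with distinct keys keeps it as the item list
lemma items_ofList_nodup (l : List (String × Int)) (hnd : (l.map (fun p => p.1)).Nodup) :
    (PySem.Dict.ofList l).items = l := by
  have h := PySem.Dict.items_foldl_insert_fresh (d := (PySem.Dict.empty : PySem.Dict String Int))
    (l := l) (k := fun p => p.1) (v := fun p => p.2)
    (fun a _ => by simp [pysem]) hnd
  simpa using h

-- characterization of the merge-join on key-sorted lists: g reads the delta value (0 if absent)
lemma mergeSub_eq (g : String → Int) (bs ds : List (String × Int))
    (hbs : bs.Pairwise (fun p q => p.1 < q.1)) (hds : ds.Pairwise (fun p q => p.1 < q.1))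
    (hg : ∀ p ∈ ds, g p.1 = p.2)
    (hng : ∀ p ∈ bs, p.1 ∉ ds.map (fun p => p.1) → g p.1 = 0) :
    mergeSub bs ds
      = (bs.map (fun p => (p.1, p.2 - g p.1))).filter (fun p => decide (0 < p.2)) := by
  induction bs, ds using mergeSub.induct with
  | case1 bs =>
    rw [mergeSub]
    have hmapid : bs.map (fun p => (p.1, p.2 - g p.1)) = bs := by
      conv_rhs => rw [← List.map_id bs]
      apply List.map_congr_left
      intro p hp
      have h0 : g p.1 = 0 := hng p hp (by simp)
      simp [h0]
    rw [hmapid]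
  | case2 d dt => rw [mergeSub]; simp
  | case3 bk bv bt dk dv dt hlt ih =>
    have hbk0 : g bk = 0 := by
      refine hng (bk, bv) (by simp) ?_
      simp only [List.map_cons, List.mem_cons]
      push_neg
      refine ⟨ne_of_lt hlt, ?_⟩
      intro hm
      rcases List.mem_map.1 hm with ⟨q, hq, hqe⟩
      have hd := (List.pairwise_cons.1 hds).1 q hq
      rw [hqe] at hd
      exact absurd hd (not_lt.2 hlt.le)
    rw [mergeSub, if_pos hlt,
      ih (List.pairwise_cons.1 hbs).2 hds (by exact hg)
        (fun p hp hm => hng p (by simp [hp]) hm)]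
    simp only [List.map_cons, List.filter_cons, hbk0]
    by_cases h : 0 < bv
    · simp [h]
    · simp [h]
  | case4 bk bv bt dk dv dt hlt hlt2 ih =>
    have hbs' : ∀ p ∈ (bk, bv) :: bt, dk < p.1 := by
      intro p hp
      rcases List.mem_cons.1 hp with h | h
      · rw [h]; exact hlt2
      · exact hlt2.trans ((List.pairwise_cons.1 hbs).1 p h)
    rw [mergeSub, if_neg hlt, if_pos hlt2]
    refine ih hbs (List.pairwise_cons.1 hds).2 (fun p hp => hg p (by simp [hp])) ?_
    intro p hp hm
    refine hng p hp ?_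
    simp only [List.map_cons, List.mem_cons]
    push_neg
    refine ⟨?_, by simpa using hm⟩
    intro he
    have hgt := hbs' p hp
    rw [he] at hgt
    exact lt_irrefl _ hgt
  | case5 bk bv bt dk dv dt hlt hlt2 ih =>
    have hk : bk = dk := le_antisymm (not_lt.1 hlt2) (not_lt.1 hlt)
    have hgd : g bk = dv := by rw [hk]; exact hg (dk, dv) (by simp)
    have hbt : ∀ p ∈ bt, dk < p.1 := by
      intro p hp
      rw [← hk]
      exact (List.pairwise_cons.1 hbs).1 p hp
    rw [mergeSub, if_neg hlt, if_neg hlt2,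
      ih (List.pairwise_cons.1 hbs).2 (List.pairwise_cons.1 hds).2
        (fun p hp => hg p (by simp [hp])) ?_]
    · simp only [List.map_cons, List.filter_cons, hgd]
      by_cases h : dv < bv
      · simp [h]
      · simp [h]
    · intro p hp hm
      refine hng p (by simp [hp]) ?_
      simp only [List.map_cons, List.mem_cons]
      push_neg
      refine ⟨?_, by simpa using hm⟩
      intro he
      have hgt := hbt p hp
      rw [he] at hgt
      exact lt_irrefl _ hgt

-- ===== VERDICT (by name: the statement is the Claim_ definition above) =====
theorem subtract_component_maps_py_spec : Claim_equal_subtract_component_maps_py := by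
  intro base delta _
  unfold Spec_subtract_component_maps_py
  have ha := nodup_keys_norm base
  have hb := nodup_keys_norm delta
  have hbn := nonneg_norm delta
  set a := normalizeComponentMap base with ha_def
  set b := normalizeComponentMap delta with hb_def
  set F : String → Int := fun k => a.getD k 0 - b.getD k 0 with hF_def
  -- A's result: the positive entries of the sorted union of keys
  have hA : subtract_component_maps_py base delta
      = ((PySem.List.sorted (PySem.Set.ofList (a.keys ++ b.keys)) (fun k => k) false).filter
          (fun k => decide (0 < F k))).map (fun k => (k, F k)) := by
    have hnd : (PySem.List.sorted (PySem.Set.ofList (a.keys ++ b.keys)) (fun k => k) false).Nodup :=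
      (PySem.List.sorted_ofList_pairwise_lt _).imp (fun h => ne_of_lt h)
    simp only [subtract_component_maps_py, ← ha_def, ← hb_def]
    rw [items_foldl_cond_insert (fun k => max 0 (F k)) _ _ hnd (fun k _ => by simp [pysem])]
    rw [show (fun k => decide (0 < max 0 (F k))) = (fun k => decide (0 < F k)) from
      funext (fun k => by simp only [decide_eq_decide]; omega)]
    rw [show (PySem.Dict.empty : PySem.Dict String Int).items = [] from rfl, List.nil_append]
    apply List.map_congr_left
    intro k hk
    have hkpos : 0 < F k := by simpa using (List.mem_filter.1 hk).2
    simp [max_eq_right hkpos.le]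
  -- keys absent from a contribute no positive value
  have hF0 : ∀ k, k ∉ a.keys → F k ≤ 0 := by
    intro k hk
    have hc : a.contains k = false := by
      rw [PySem.Dict.contains_eq_decide_mem_keys]; simp [hk]
    have h0 := PySem.Dict.getD_of_not_contains a 0 hc
    have h1 := hbn k
    simp only [hF_def, h0]
    omega
  -- B's result via the merge-join characterization
  have hbs : PySem.List.sorted a.items (fun p => p.1) false
      = (PySem.List.sorted a.keys (fun k => k) false).map (fun k => (k, a.getD k 0)) :=
    sorted_items_eq a ha
  have hds : PySem.List.sorted b.items (fun p => p.1) false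
      = (PySem.List.sorted b.keys (fun k => k) false).map (fun k => (k, b.getD k 0)) :=
    sorted_items_eq b hb
  have hpwa : (PySem.List.sorted a.items (fun p => p.1) false).Pairwise (fun p q => p.1 < q.1) := by
    rw [hbs]
    exact List.Pairwise.map _ (fun x y h => h) (sorted_keys_pairwise_lt a.keys ha)
  have hpwb : (PySem.List.sorted b.items (fun p => p.1) false).Pairwise (fun p q => p.1 < q.1) := by
    rw [hds]
    exact List.Pairwise.map _ (fun x y h => h) (sorted_keys_pairwise_lt b.keys hb)
  have hmerge := mergeSub_eq (fun k => b.getD k 0)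
    (PySem.List.sorted a.items (fun p => p.1) false)
    (PySem.List.sorted b.items (fun p => p.1) false) hpwa hpwb
    (fun p hp => PySem.Dict.getD_of_mem_items b ((PySem.List.mem_sorted _ _ _ _).1 hp) hb 0)
    (by
      intro p _ hm
      apply PySem.Dict.getD_of_not_contains
      rw [PySem.Dict.contains_eq_decide_mem_keys]
      simp only [decide_eq_false_iff_not]
      intro hk
      refine hm ?_
      rw [hds, List.map_map]
      simpa [Function.comp, PySem.List.mem_sorted] using hk)
  have hmm : mergeSub (PySem.List.sorted a.items (fun p => p.1) false)
      (PySem.List.sorted b.items (fun p => p.1) false)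
      = ((PySem.List.sorted (a.keys.filter (fun k => decide (0 < F k))) (fun k => k) false).map
          (fun k => (k, F k))) := by
    rw [hmerge, hbs, List.map_map]
    have hcomp : ((fun p : String × Int => (p.1, p.2 - b.getD p.1 0)) ∘
        (fun k => (k, a.getD k 0))) = fun k => (k, F k) := by
      funext k; simp [hF_def]
    rw [hcomp, List.filter_map]
    have hpred : ((fun p : String × Int => decide (0 < p.2)) ∘ (fun k => (k, F k)))
        = fun k => decide (0 < F k) := by
      funext k; simp
    rw [hpred, filter_sorted_keys a.keys ha]
  have hnodup : ((mergeSub (PySem.List.sorted a.items (fun p => p.1) false)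
      (PySem.List.sorted b.items (fun p => p.1) false)).map (fun p => p.1)).Nodup := by
    rw [hmm, List.map_map]
    have : ((fun p : String × Int => p.1) ∘ (fun k => (k, F k))) = id := by
      funext k; simp
    rw [this, List.map_id]
    exact (PySem.List.sorted_perm _ (fun k => k) false).nodup_iff.2 (ha.filter _)
  have hB : subtract_component_maps_py_alt base delta
      = ((PySem.List.sorted (a.keys.filter (fun k => decide (0 < F k))) (fun k => k) false).map
          (fun k => (k, F k))) := by
    simp only [subtract_component_maps_py_alt, ← ha_def, ← hb_def]
    rw [items_ofList_nodup _ hnodup, hmm]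
  rw [hA, hB, sorted_union_filter_eq a.keys b.keys ha F hF0]
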